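-- pv_equiv track=rewrite | github.com/alessio-maffioletti/niclale | collision_rects.py | group_horizontal_blocks
-- ===== SOURCE A (Python) =====
-- def group_horizontal_blocks(json_data, block_size):
--     """
--     Groups horizontal blocks into rectangles based on their x and y coordinates.
--     Blocks that are not adjacent horizontally form separate rectangles.
--     """
--     # Extract only the coordinates and sort by row (y), then by column (x)
--     wall_blocks = [block[0] for block in json_data]
--     wall_blocks.sort(key=lambda coord: (coord[1], coord[0]))
--
--     grouped_rectangles = []
--     current_row = []
--     current_y = None
--
--     for block in wall_blocks:
--         x, y = block
--
--         # If we're on a new row, finalize the current row and start a new one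
--         if current_y is not None and y != current_y:
--             if current_row:
--                 grouped_rectangles.append({
--                     "x": current_row[0][0] * block_size,
--                     "y": current_y * block_size,
--                     "width": len(current_row) * block_size,
--                     "height": block_size
--                 })
--             current_row = []
--
--         # Check if the block is adjacent to the previous one in the same row
--         if current_row and x != current_row[-1][0] + 1:
--             # Finalize the current rectangle and start a new one
--             grouped_rectangles.append({
--                 "x": current_row[0][0] * block_size,
--                 "y": current_y * block_size,
--                 "width": len(current_row) * block_size,
--                 "height": block_size
--             })
--             current_row = []
--
--         # Add the block to the current row
--         current_row.append(block)
--         current_y = y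
--
--     # Finalize the last row
--     if current_row:
--         grouped_rectangles.append({
--             "x": current_row[0][0] * block_size,
--             "y": current_y * block_size,
--             "width": len(current_row) * block_size,
--             "height": block_size
--         })
--
--     return grouped_rectangles
-- ===== SOURCE B (Python) =====
-- def group_horizontal_blocks(json_data, block_size):
--     # Two-pointer run extraction over the sorted coordinates: each maximal run of
--     # consecutive x's within one row becomes a rectangle directly.
--     coords = sorted((block[0] for block in json_data), key=lambda c: (c[1], c[0]))
--     rects = []
--     while coords:
--         x0, y0 = coords[0]
--         k = 1
--         while k < len(coords) and coords[k][1] == y0 and coords[k][0] == x0 + k: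
--             k += 1
--         rects.append({"x": x0 * block_size, "y": y0 * block_size,
--                       "width": k * block_size, "height": block_size})
--         coords = coords[k:]
--     return rects
-- ===== Notes on version B (the rewrite author's own statement) =====
-- stated objective: simpler
-- what changed: A folds over the sorted blocks with current_row/current_y state and three separate flush sites; B walks the sorted list with two pointers, extracting each maximal run of row-adjacent blocks and emitting its rectangle directly, with no accumulator state and a single emit site.
import Mathlib
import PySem

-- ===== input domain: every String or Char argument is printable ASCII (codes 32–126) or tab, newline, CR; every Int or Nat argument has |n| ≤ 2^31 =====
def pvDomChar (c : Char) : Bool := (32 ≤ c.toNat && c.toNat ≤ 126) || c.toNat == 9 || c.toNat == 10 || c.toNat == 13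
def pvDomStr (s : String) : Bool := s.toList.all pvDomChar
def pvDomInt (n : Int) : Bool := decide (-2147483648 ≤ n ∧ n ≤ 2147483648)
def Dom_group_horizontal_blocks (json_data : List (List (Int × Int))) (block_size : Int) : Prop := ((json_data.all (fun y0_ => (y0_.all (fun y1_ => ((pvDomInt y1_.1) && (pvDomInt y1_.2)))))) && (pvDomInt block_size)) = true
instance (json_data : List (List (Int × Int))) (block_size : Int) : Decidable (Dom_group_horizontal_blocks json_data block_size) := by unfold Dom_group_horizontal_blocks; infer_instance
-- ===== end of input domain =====

-- B replaces A's state-machine fold (current_row / current_y accumulators) by direct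
-- extraction of maximal runs of row-adjacent blocks from the sorted list; objective: simpler.

-- ===== PORT A =====
-- the rectangle dict literal: keys in insertion order
def mkRectA (row : List (Int × Int)) (cy : Int) (bs : Int) : List (String × Int) :=
  [("x", ((PySem.List.pyGet? row 0).getD (0, 0)).1 * bs), ("y", cy * bs),
   ("width", (row.length : Int) * bs), ("height", bs)]

-- loop body of A's for-loop; state = (grouped_rectangles, current_row, current_y)
def stepA (bs : Int) (st : List (List (String × Int)) × List (Int × Int) × Option Int)
    (b : Int × Int) : List (List (String × Int)) × List (Int × Int) × Option Int :=
  let x := b.1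
  let y := b.2
  let p1 : List (List (String × Int)) × List (Int × Int) :=
    match st.2.2 with
    | some cy' =>
        if y ≠ cy' then
          ((if st.2.1 ≠ [] then st.1 ++ [mkRectA st.2.1 cy' bs] else st.1), [])
        else (st.1, st.2.1)
    | none => (st.1, st.2.1)
  let p2 : List (List (String × Int)) × List (Int × Int) :=
    if p1.2 ≠ [] ∧ x ≠ ((PySem.List.pyGet? p1.2 (-1)).getD (0, 0)).1 + 1 then
      (p1.1 ++ [mkRectA p1.2 (st.2.2.getD 0) bs], [])
    else p1
  (p2.1, p2.2 ++ [(x, y)], some y)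

-- the trailing 'if current_row: …' flush
def finishA (bs : Int) (st : List (List (String × Int)) × List (Int × Int) × Option Int) :
    List (List (String × Int)) :=
  if st.2.1 ≠ [] then st.1 ++ [mkRectA st.2.1 (st.2.2.getD 0) bs] else st.1

def group_horizontal_blocks (json_data : List (List (Int × Int))) (block_size : Int) :
    List (List (String × Int)) :=
  let wall_blocks := json_data.map (fun b => (PySem.List.pyGet? b 0).getD (0, 0))
  let sortedBlocks := PySem.List.sorted2 wall_blocks (fun c => c.2) (fun c => c.1)
  finishA block_size (sortedBlocks.foldl (stepA block_size) ([], [], none))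

-- ===== PORT B =====
-- inner while loop: length of the maximal run starting at (x0,y0), k counted so far
def runLenB (x0 y0 : Int) (k : Nat) : List (Int × Int) → Nat
  | [] => k
  | c :: rest => if c.2 = y0 ∧ c.1 = x0 + (k : Int) then runLenB x0 y0 (k + 1) rest else k

-- outer while loop ('while coords: … coords = coords[k:]'), made structural with a fuel
-- bounded by the list length (each iteration consumes at least one element, so the
-- fuel is never exhausted when started at the list's length)
def runSplitB (bs : Int) : Nat → List (Int × Int) → List (List (String × Int))
  | _, [] => []
  | 0, _ :: _ => []
  | f + 1, c :: rest =>
      let k := runLenB c.1 c.2 1 rest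
      [("x", c.1 * bs), ("y", c.2 * bs), ("width", (k : Int) * bs), ("height", bs)]
        :: runSplitB bs f (rest.drop (k - 1))

def group_horizontal_blocks_alt (json_data : List (List (Int × Int))) (block_size : Int) :
    List (List (String × Int)) :=
  let coords := PySem.List.sorted2 (json_data.map (fun b => (PySem.List.pyGet? b 0).getD (0, 0)))
    (fun c => c.2) (fun c => c.1)
  runSplitB block_size coords.length coords

-- ===== PRECONDITION & SPEC =====
-- Pre_ excludes json_data containing an empty inner list: there 'block[0]' raises IndexError in A (and in B).
def Pre_group_horizontal_blocks (json_data : List (List (Int × Int))) (block_size : Int) : Prop :=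
  ∀ b ∈ json_data, b ≠ []
instance (json_data : List (List (Int × Int))) (block_size : Int) : Decidable (Pre_group_horizontal_blocks json_data block_size) := by unfold Pre_group_horizontal_blocks; infer_instance

def pvWitness_group_horizontal_blocks : (List (List (Int × Int))) × Int :=
  ([[(1, 0)], [(2, 0)], [(5, 0)], [(1, 1)]], 2)

def Spec_group_horizontal_blocks (json_data : List (List (Int × Int))) (block_size : Int) (out : List (List (String × Int))) : Prop := out = group_horizontal_blocks_alt json_data block_size
instance (json_data : List (List (Int × Int))) (block_size : Int) (out : List (List (String × Int))) : Decidable (Spec_group_horizontal_blocks json_data block_size out) := by unfold Spec_group_horizontal_blocks; infer_instance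

-- ===== CLAIM (what is proved, stated in full; the proofs are below) =====
def Claim_equal_group_horizontal_blocks : Prop := ∀ (json_data : List (List (Int × Int))) (block_size : Int), Dom_group_horizontal_blocks json_data block_size → Pre_group_horizontal_blocks json_data block_size → Spec_group_horizontal_blocks json_data block_size (group_horizontal_blocks json_data block_size)

-- ===== LEMMAS AND PROOFS =====

theorem runLenB_ge (x0 y0 : Int) (k : Nat) (l : List (Int × Int)) : k ≤ runLenB x0 y0 k l := by
  induction l generalizing k with
  | nil => exact Nat.le_refl k
  | cons c rest ih =>
      simp only [runLenB]
      split
      · exact le_trans (Nat.le_succ k) (ih (k + 1))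
      · exact le_refl k

-- the fuel does not matter as long as it is at least the list length
theorem runSplitB_fuel (bs : Int) (f : Nat) :
    ∀ (g : Nat) (l : List (Int × Int)), l.length ≤ f → l.length ≤ g →
      runSplitB bs f l = runSplitB bs g l := by
  induction f with
  | zero =>
      intro g l hf _
      have : l = [] := List.eq_nil_of_length_eq_zero (by omega)
      subst this
      cases g <;> rfl
  | succ f' ih =>
      intro g l hf hg
      cases l with
      | nil => cases g <;> rfl
      | cons c rest =>
          cases g with
          | zero => simp at hg
          | succ g' =>
              simp only [runSplitB]
              congr 1
              have hd : (rest.drop (runLenB c.1 c.2 1 rest - 1)).length ≤ rest.length := by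
                rw [List.length_drop]; omega
              exact ih g' _ (le_trans hd (by simp at hf; omega)) (le_trans hd (by simp at hg; omega))

-- runSplitB with exact-length fuel, unfolded one run at a time
theorem runSplitB_len_nil (bs : Int) : runSplitB bs ([] : List (Int × Int)).length [] = [] := rfl

theorem runSplitB_len_cons (bs : Int) (c : Int × Int) (rest : List (Int × Int)) :
    runSplitB bs (c :: rest).length (c :: rest) =
      [("x", c.1 * bs), ("y", c.2 * bs), ("width", ((runLenB c.1 c.2 1 rest : Nat) : Int) * bs), ("height", bs)]
        :: runSplitB bs (rest.drop (runLenB c.1 c.2 1 rest - 1)).length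
             (rest.drop (runLenB c.1 c.2 1 rest - 1)) := by
  simp only [List.length_cons, runSplitB]
  congr 1
  have hd : (rest.drop (runLenB c.1 c.2 1 rest - 1)).length ≤ rest.length := by
    rw [List.length_drop]; omega
  exact runSplitB_fuel bs rest.length _ _ hd (le_refl _)

-- the current_row A maintains mid-run: k consecutive x's starting at x0, all in row y0
def mkRow (x0 y0 : Int) (k : Nat) : List (Int × Int) :=
  (List.range k).map (fun i => (x0 + (i : Int), y0))

theorem mkRow_length (x0 y0 : Int) (k : Nat) : (mkRow x0 y0 k).length = k := by
  simp [mkRow]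

theorem mkRow_ne_nil (x0 y0 : Int) (k : Nat) (hk : 1 ≤ k) : mkRow x0 y0 k ≠ [] := by
  intro h
  have := mkRow_length x0 y0 k
  rw [h] at this
  simp at this
  omega

theorem mkRow_succ (x0 y0 : Int) (k : Nat) :
    mkRow x0 y0 (k + 1) = mkRow x0 y0 k ++ [(x0 + (k : Int), y0)] := by
  simp [mkRow, List.range_succ]

theorem mkRow_head (x0 y0 : Int) (k : Nat) (hk : 1 ≤ k) :
    (PySem.List.pyGet? (mkRow x0 y0 k) 0).getD (0, 0) = (x0, y0) := by
  obtain ⟨m, rfl⟩ : ∃ m, k = m + 1 := ⟨k - 1, by omega⟩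
  rw [PySem.List.pyGet?_zero]
  simp [mkRow, List.range_succ_eq_map]

theorem mkRow_last (x0 y0 : Int) (k : Nat) (hk : 1 ≤ k) :
    ((PySem.List.pyGet? (mkRow x0 y0 k) (-1)).getD (0, 0)).1 = x0 + (k : Int) - 1 := by
  obtain ⟨m, rfl⟩ : ∃ m, k = m + 1 := ⟨k - 1, by omega⟩
  rw [mkRow_succ, PySem.List.pyGet?_neg_one_append_singleton]
  simp only [Option.getD_some]
  push_cast
  ring

theorem mkRectA_mkRow (x0 y0 : Int) (k : Nat) (hk : 1 ≤ k) (bs : Int) :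
    mkRectA (mkRow x0 y0 k) y0 bs =
      [("x", x0 * bs), ("y", y0 * bs), ("width", (k : Int) * bs), ("height", bs)] := by
  simp [mkRectA, mkRow_head x0 y0 k hk, mkRow_length]

-- what the loop body does to a mid-run state: extend the run or flush it
theorem stepA_midrun (bs : Int) (gr : List (List (String × Int))) (x0 y0 : Int) (k : Nat)
    (hk : 1 ≤ k) (c : Int × Int) :
    stepA bs (gr, mkRow x0 y0 k, some y0) c =
      if c.2 = y0 ∧ c.1 = x0 + (k : Int) then (gr, mkRow x0 y0 (k + 1), some y0)
      else (gr ++ [mkRectA (mkRow x0 y0 k) y0 bs], mkRow c.1 c.2 1, some c.2) := by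
  have hne := mkRow_ne_nil x0 y0 k hk
  have hlast := mkRow_last x0 y0 k hk
  by_cases hcont : c.2 = y0 ∧ c.1 = x0 + (k : Int)
  · rw [if_pos hcont]
    simp only [stepA]
    rw [if_neg (show ¬ c.2 ≠ y0 by simp [hcont.1])]
    rw [if_neg (show ¬ ((gr, mkRow x0 y0 k).2 ≠ [] ∧
        c.1 ≠ ((PySem.List.pyGet? (gr, mkRow x0 y0 k).2 (-1)).getD (0, 0)).1 + 1) by
      intro h
      apply h.2
      rw [hlast, hcont.2]
      ring)]
    simp [mkRow_succ, hcont.1, hcont.2]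
  · rw [if_neg hcont]
    by_cases hy : c.2 = y0
    · have hx : c.1 ≠ x0 + (k : Int) := fun h => hcont ⟨hy, h⟩
      simp only [stepA]
      rw [if_neg (show ¬ c.2 ≠ y0 by simp [hy])]
      rw [if_pos (show (gr, mkRow x0 y0 k).2 ≠ [] ∧
          c.1 ≠ ((PySem.List.pyGet? (gr, mkRow x0 y0 k).2 (-1)).getD (0, 0)).1 + 1 from
        ⟨hne, by rw [hlast]; intro h; exact hx (by rw [h]; ring)⟩)]
      simp [mkRow, hy]
    · simp only [stepA]
      rw [if_pos hy, if_pos hne]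
      rw [if_neg (show ¬ (((gr ++ [mkRectA (mkRow x0 y0 k) y0 bs] : List (List (String × Int))),
          ([] : List (Int × Int))).2 ≠ [] ∧
          c.1 ≠ ((PySem.List.pyGet? ((gr ++ [mkRectA (mkRow x0 y0 k) y0 bs],
            ([] : List (Int × Int))).2 : List (Int × Int)) (-1)).getD (0, 0)).1 + 1) by simp)]
      simp [mkRow]

-- main invariant: running A's fold from a mid-run state and flushing equals emitting the
-- completed run's rectangle followed by B's run-splitting of the remainder
theorem fold_run (bs : Int) (l : List (Int × Int)) :
    ∀ (gr : List (List (String × Int))) (x0 y0 : Int) (k : Nat), 1 ≤ k →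
    finishA bs (l.foldl (stepA bs) (gr, mkRow x0 y0 k, some y0)) =
      gr ++ ([("x", x0 * bs), ("y", y0 * bs), ("width", ((runLenB x0 y0 k l : Nat) : Int) * bs), ("height", bs)]
        :: runSplitB bs (l.drop (runLenB x0 y0 k l - k)).length (l.drop (runLenB x0 y0 k l - k))) := by
  induction l with
  | nil =>
      intro gr x0 y0 k hk
      simp only [List.foldl_nil, finishA, runLenB, List.drop_nil, runSplitB_len_nil]
      rw [if_pos (mkRow_ne_nil x0 y0 k hk)]
      simp [mkRectA_mkRow x0 y0 k hk bs]
  | cons c rest ih =>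
      intro gr x0 y0 k hk
      rw [List.foldl_cons, stepA_midrun bs gr x0 y0 k hk c]
      by_cases hcont : c.2 = y0 ∧ c.1 = x0 + (k : Int)
      · -- run continues
        rw [if_pos hcont, ih gr x0 y0 (k + 1) (by omega)]
        have hrl : runLenB x0 y0 k (c :: rest) = runLenB x0 y0 (k + 1) rest := by
          simp [runLenB, hcont.1, hcont.2]
        rw [hrl]
        have hge : k + 1 ≤ runLenB x0 y0 (k + 1) rest := runLenB_ge x0 y0 (k + 1) rest
        have hdrop : (c :: rest).drop (runLenB x0 y0 (k + 1) rest - k) =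
            rest.drop (runLenB x0 y0 (k + 1) rest - (k + 1)) := by
          have : runLenB x0 y0 (k + 1) rest - k = (runLenB x0 y0 (k + 1) rest - (k + 1)) + 1 := by omega
          rw [this, List.drop_succ_cons]
        rw [hdrop]
      · -- run breaks: A flushes the rectangle, restarts the row at c
        rw [if_neg hcont, ih _ c.1 c.2 1 (le_refl 1)]
        have hrl : runLenB x0 y0 k (c :: rest) = k := by
          simp only [runLenB]
          rw [if_neg hcont]
        rw [hrl, Nat.sub_self, List.drop_zero, runSplitB_len_cons]
        rw [mkRectA_mkRow x0 y0 k hk bs]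
        simp

theorem fold_eq_runSplit (bs : Int) (l : List (Int × Int)) :
    finishA bs (l.foldl (stepA bs) ([], [], none)) = runSplitB bs l.length l := by
  cases l with
  | nil => simp [finishA, runSplitB]
  | cons c rest =>
      have hstep : stepA bs (([] : List (List (String × Int))), ([] : List (Int × Int)), (none : Option Int)) c
          = ([], mkRow c.1 c.2 1, some c.2) := by
        simp [stepA, mkRow]
      rw [List.foldl_cons, hstep, fold_run bs rest [] c.1 c.2 1 (le_refl 1), runSplitB_len_cons]
      simp

-- ===== VERDICT (by name: the statement is the Claim_ definition above) =====
theorem group_horizontal_blocks_spec : Claim_equal_group_horizontal_blocks := by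
  intro json_data block_size _ _
  unfold Spec_group_horizontal_blocks group_horizontal_blocks group_horizontal_blocks_alt
  exact fold_eq_runSplit block_size _
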